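-- pv_equiv track=rewrite | github.com/kpollz/innovation_hub | backend/app/application/use_cases/event_idea/html_to_tiptap.py | _parse_align
-- ===== SOURCE A (Python) =====
-- def _parse_align(attrs: list[tuple[str, str | None]]) -> str | None:
--     for k, v in attrs:
--         if k == "style" and v and "text-align" in v:
--             for part in v.split(";"):
--                 part = part.strip()
--                 if part.startswith("text-align:"):
--                     return part.split(":", 1)[1].strip()
--     return None
-- ===== SOURCE B (Python) =====
-- import re
--
-- _ALIGN_RE = re.compile(r'(?:^|;)\s*text-align:([^;]*)')
--
-- def _parse_align(attrs):
--     for k, v in attrs: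
--         if k == "style" and v:
--             m = _ALIGN_RE.search(v)
--             if m:
--                 return m.group(1).strip()
--     return None
-- ===== Notes on version B (the rewrite author's own statement) =====
-- stated objective: idiomatic
-- what changed: A's inner split-on-';' loop with strip/startswith per part is replaced by a single regex search re.search(r'(?:^|;)\s*text-align:([^;]*)', v) whose first (leftmost) match yields the stripped value; the outer loop over attributes is kept.
import Mathlib
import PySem

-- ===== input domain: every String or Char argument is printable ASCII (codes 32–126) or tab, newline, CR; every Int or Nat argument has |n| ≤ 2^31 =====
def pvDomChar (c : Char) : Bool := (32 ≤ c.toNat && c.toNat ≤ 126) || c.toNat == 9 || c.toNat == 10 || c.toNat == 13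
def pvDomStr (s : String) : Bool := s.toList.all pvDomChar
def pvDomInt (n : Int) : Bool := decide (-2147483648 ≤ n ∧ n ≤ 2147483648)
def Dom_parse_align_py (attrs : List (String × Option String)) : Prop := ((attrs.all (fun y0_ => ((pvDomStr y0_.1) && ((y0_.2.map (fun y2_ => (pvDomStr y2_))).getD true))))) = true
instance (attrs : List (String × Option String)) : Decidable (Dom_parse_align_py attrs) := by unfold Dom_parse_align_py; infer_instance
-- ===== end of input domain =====

-- B replaces A's split-on-';'/strip/startswith inner scan by a single left-to-right
-- pattern search for '(?:^|;)\s*text-align:([^;]*)' (idiomatic regex in Python,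
-- hand-ported step for step here); same outer loop over the attributes.

-- ===== PORT A =====
-- inner 'for part in v.split(";")' loop of A
def pvParseAlignInner : List String → Option String
  | [] => none
  | p :: ps =>
    let p' := PySem.Str.strip p
    if PySem.Str.startswith p' "text-align:" then
      -- part.split(":", 1)[1].strip(); p' starts with "text-align:" so index 1 exists
      -- (the 'none' fall-throughs are unreachable: ":" is nonempty and a ':' is present)
      match PySem.Str.splitMax? p' ":" 1 with
      | some l =>
        match PySem.List.pyGet? l 1 with
        | some second => some (PySem.Str.strip second)
        | none => none
      | none => none
    else pvParseAlignInner ps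

def parse_align_py : List (String × Option String) → Option String
  | [] => none
  | (k, v) :: rest =>
    let hit : Option String :=
      match v with
      | some s =>
        if k == "style" && !(s == "") && PySem.Str.isIn "text-align" s then
          match PySem.Str.split? s ";" with
          | some parts => pvParseAlignInner parts
          | none => none          -- unreachable: ";" is nonempty
        else none
      | none => none
    match hit with
    | some r => some r            -- 'return' inside the loop
    | none => parse_align_py rest -- fall through to the next attribute

-- ===== PORT B =====
-- hand port of re.search(r'(?:^|;)\s*text-align:([^;]*)', v) for this FIXED pattern:
-- pvTryBody tries the match body '\s*text-align:([^;]*)' at one position,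
-- pvScan walks the string trying the ';' alternative at each position,
-- pvSearch first tries the '^' alternative then scans (leftmost match).
def pvTryBody (cs : List Char) : Option (List Char) :=
  if "text-align:".toList.isPrefixOf (cs.dropWhile PySem.Chars.isspace) then  -- \s* then literal 'text-align:'
    some (((cs.dropWhile PySem.Chars.isspace).drop 11).takeWhile (fun c => c != ';'))  -- capture ([^;]*)
  else none

def pvScan : List Char → Option (List Char)
  | [] => none
  | c :: rest =>
    if c == ';' then
      match pvTryBody rest with
      | some cap => some cap
      | none => pvScan rest
    else pvScan rest

def pvSearch (cs : List Char) : Option (List Char) :=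
  match pvTryBody cs with         -- '^' alternative at position 0
  | some cap => some cap
  | none => pvScan cs

def parse_align_py_alt : List (String × Option String) → Option String
  | [] => none
  | (k, v) :: rest =>
    let hit : Option String :=
      match v with
      | some s =>
        if k == "style" && !(s == "") then
          (pvSearch s.toList).map (fun cap => String.ofList (PySem.Chars.strip cap))  -- m.group(1).strip()
        else none
      | none => none
    match hit with
    | some r => some r
    | none => parse_align_py_alt rest

-- ===== PRECONDITION & SPEC =====
def Spec_parse_align_py (attrs : List (String × Option String)) (out : Option String) : Prop := out = parse_align_py_alt attrs
instance (attrs : List (String × Option String)) (out : Option String) : Decidable (Spec_parse_align_py attrs out) := by unfold Spec_parse_align_py; infer_instance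

-- ===== CLAIM (what is proved, stated in full; the proofs are below) =====
def Claim_equal_parse_align_py : Prop := ∀ (attrs : List (String × Option String)), Dom_parse_align_py attrs → Spec_parse_align_py attrs (parse_align_py attrs)

-- ===== LEMMAS AND PROOFS =====

-- proof-only helpers: a clean single-char splitter, the join it inverts, and the
-- "first segment whose lstrip starts with the prefix" scan both programs compute.
def pvMySplit : List Char → List (List Char)
  | [] => [[]]
  | c :: rest =>
    if c = ';' then [] :: pvMySplit rest
    else
      match pvMySplit rest with
      | [] => [[c]]
      | h :: t => (c :: h) :: t

def pvIntercal : List (List Char) → List Char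
  | [] => []
  | [s] => s
  | s :: t => s ++ ';' :: pvIntercal t

def pvRawFind : List (List Char) → Option (List Char)
  | [] => none
  | seg :: t =>
    if "text-align:".toList.isPrefixOf (seg.dropWhile PySem.Chars.isspace) then
      some ((seg.dropWhile PySem.Chars.isspace).drop 11)
    else pvRawFind t

theorem pvMySplit_ne_nil (cs : List Char) : pvMySplit cs ≠ [] := by
  cases cs with
  | nil => simp [pvMySplit]
  | cons c rest =>
    simp only [pvMySplit]
    split
    · simp
    · split <;> simp

theorem pvMySplit_no_semi (cs : List Char) : ∀ seg ∈ pvMySplit cs, ';' ∉ seg := by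
  induction cs with
  | nil => intro seg h; simp [pvMySplit] at h; simp [h]
  | cons c rest ih =>
    intro seg h
    simp only [pvMySplit] at h
    by_cases hc : c = ';'
    · simp [hc] at h
      rcases h with h | h
      · simp [h]
      · exact ih seg h
    · simp [hc] at h
      rcases hsp : pvMySplit rest with _ | ⟨h0, t0⟩
      · exact absurd hsp (pvMySplit_ne_nil rest)
      · rw [hsp] at h
        simp at h
        rcases h with h | h
        · subst h
          intro hmem
          rcases List.mem_cons.mp hmem with h | h
          · exact hc h.symm
          · exact ih h0 (by rw [hsp]; exact List.mem_cons_self) h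
        · exact ih seg (by rw [hsp]; exact List.mem_cons_of_mem _ h)

theorem pvIntercal_mySplit (cs : List Char) : pvIntercal (pvMySplit cs) = cs := by
  induction cs with
  | nil => rfl
  | cons c rest ih =>
    simp only [pvMySplit]
    by_cases hc : c = ';'
    · subst hc
      simp only []
      rcases hsp : pvMySplit rest with _ | ⟨h0, t0⟩
      · exact absurd hsp (pvMySplit_ne_nil rest)
      · rw [hsp] at ih
        show pvIntercal ([] :: h0 :: t0) = ';' :: rest
        simp [pvIntercal, ih]
    · simp only [if_neg hc]
      rcases hsp : pvMySplit rest with _ | ⟨h0, t0⟩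
      · exact absurd hsp (pvMySplit_ne_nil rest)
      · rw [hsp] at ih
        cases t0 with
        | nil => simpa [pvIntercal] using congrArg (c :: ·) ih
        | cons t1 t2 =>
          show pvIntercal ((c :: h0) :: t1 :: t2) = c :: rest
          simp only [pvIntercal] at ih ⊢
          rw [List.cons_append, ih]

-- PySem.Chars.splitOn with separator ";" is pvMySplit
theorem pv_go_semi (fuel : Nat) : ∀ (l cur : List Char) (acc : List (List Char)),
    l.length < fuel →
    PySem.Chars.splitOn.go [';'] fuel l cur acc =
      acc.reverse ++ (match pvMySplit l with
        | [] => [cur.reverse]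
        | h :: t => (cur.reverse ++ h) :: t) := by
  induction fuel with
  | zero => intro l cur acc h; omega
  | succ n ih =>
    intro l cur acc h
    cases l with
    | nil => simp [PySem.Chars.splitOn.go, pvMySplit]
    | cons c rest =>
      by_cases hc : c = ';'
      · subst hc
        rw [show PySem.Chars.splitOn.go [';'] (n+1) (';' :: rest) cur acc =
            PySem.Chars.splitOn.go [';'] n rest [] (cur.reverse :: acc) by
          simp [PySem.Chars.splitOn.go, List.isPrefixOf]]
        rw [ih rest [] (cur.reverse :: acc) (by simpa using Nat.lt_of_succ_lt_succ h)]
        rcases hsp : pvMySplit rest with _ | ⟨h0, t0⟩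
        · exact absurd hsp (pvMySplit_ne_nil rest)
        · simp [pvMySplit, hsp]
      · rw [show PySem.Chars.splitOn.go [';'] (n+1) (c :: rest) cur acc =
            PySem.Chars.splitOn.go [';'] n rest (c :: cur) acc by
          simp [PySem.Chars.splitOn.go, List.isPrefixOf, (Ne.symm hc)]]
        rw [ih rest (c :: cur) acc (by simpa using Nat.lt_of_succ_lt_succ h)]
        rcases hsp : pvMySplit rest with _ | ⟨h0, t0⟩
        · exact absurd hsp (pvMySplit_ne_nil rest)
        · simp [pvMySplit, hc, hsp]

theorem pv_splitOn_semi (cs : List Char) : PySem.Chars.splitOn cs [';'] = pvMySplit cs := by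
  rw [PySem.Chars.splitOn, pv_go_semi (cs.length + 1) cs [] [] (by omega)]
  rcases hsp : pvMySplit cs with _ | ⟨h0, t0⟩
  · exact absurd hsp (pvMySplit_ne_nil cs)
  · simp

-- split(":", 1) on a string of the shape a ++ ':' :: s' with ':' ∉ a
theorem pv_goMax0 (fuel : Nat) (hf : 0 < fuel) (s' : List Char) (acc : List (List Char)) :
    PySem.Chars.splitOnMax.go [':'] fuel 0 s' [] acc = acc.reverse ++ [s'] := by
  cases fuel with
  | zero => omega
  | succ n => cases s' <;> simp [PySem.Chars.splitOnMax.go]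

theorem pv_goMax_colon : ∀ (a : List Char), ':' ∉ a → ∀ (fuel : Nat) (s' cur : List Char) (acc : List (List Char)),
    a.length + s'.length + 1 < fuel →
    PySem.Chars.splitOnMax.go [':'] fuel 1 (a ++ ':' :: s') cur acc =
      acc.reverse ++ [cur.reverse ++ a, s'] := by
  intro a
  induction a with
  | nil =>
    intro _ fuel s' cur acc hf
    cases fuel with
    | zero => omega
    | succ n =>
      rw [show PySem.Chars.splitOnMax.go [':'] (n+1) 1 ([] ++ ':' :: s') cur acc =
          PySem.Chars.splitOnMax.go [':'] n 0 s' [] (cur.reverse :: acc) by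
        simp [PySem.Chars.splitOnMax.go, List.isPrefixOf]]
      rw [pv_goMax0 n (by simp only [List.length_nil] at hf; omega) s' (cur.reverse :: acc)]
      simp
  | cons c a' ih =>
    intro hnc fuel s' cur acc hf
    have hc : c ≠ ':' := fun h => hnc (by simp [h])
    cases fuel with
    | zero => omega
    | succ n =>
      rw [show PySem.Chars.splitOnMax.go [':'] (n+1) 1 ((c :: a') ++ ':' :: s') cur acc =
          PySem.Chars.splitOnMax.go [':'] n 1 (a' ++ ':' :: s') (c :: cur) acc by
        simp [PySem.Chars.splitOnMax.go, List.isPrefixOf, (Ne.symm hc)]]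
      rw [ih (fun h => hnc (List.mem_cons_of_mem _ h)) n s' (c :: cur) acc (by simp at hf ⊢; omega)]
      simp

theorem pv_splitOnMax_colon (a s' : List Char) (ha : ':' ∉ a) :
    PySem.Chars.splitOnMax (a ++ ':' :: s') [':'] 1 = [a, s'] := by
  rw [PySem.Chars.splitOnMax]
  rw [if_neg (by omega)]
  rw [show (1:Int).toNat = 1 from rfl]
  rw [pv_goMax_colon a ha _ s' [] [] (by simp only [List.length_append, List.length_cons]; omega)]
  simp

-- strip facts
theorem pv_rstrip_append (a b : List Char) (ha : PySem.Chars.rstrip a = a) :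
    PySem.Chars.rstrip (a ++ b) = a ++ PySem.Chars.rstrip b := by
  unfold PySem.Chars.rstrip at *
  rw [List.reverse_append, List.dropWhile_append]
  by_cases hb : (List.dropWhile PySem.Chars.isspace b.reverse).isEmpty
  · rw [if_pos hb, ha]
    rw [List.isEmpty_iff] at hb
    rw [hb]
    simp
  · rw [if_neg hb]
    simp

theorem pv_rstrip_prefix (l : List Char) : PySem.Chars.rstrip l <+: l := by
  unfold PySem.Chars.rstrip
  have h := List.dropWhile_suffix (l := l.reverse) PySem.Chars.isspace
  have := List.IsSuffix.reverse h
  simpa using this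

theorem pv_pref_rstrip : PySem.Chars.rstrip "text-align:".toList = "text-align:".toList := by decide

-- the A-side test "pref prefix of strip seg" ↔ the B-side test "pref prefix of lstrip seg"
theorem pv_prefix_strip_iff (seg : List Char) :
    ("text-align:".toList <+: PySem.Chars.strip seg) ↔
      ("text-align:".toList <+: seg.dropWhile PySem.Chars.isspace) := by
  unfold PySem.Chars.strip PySem.Chars.lstrip
  constructor
  · intro h
    exact h.trans (pv_rstrip_prefix _)
  · rintro ⟨s', hs'⟩
    rw [← hs', pv_rstrip_append _ _ pv_pref_rstrip]
    exact ⟨PySem.Chars.rstrip s', rfl⟩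

theorem pv_dropWhile_idem (p : Char → Bool) (l : List Char) :
    List.dropWhile p (List.dropWhile p l) = List.dropWhile p l := by
  induction l with
  | nil => rfl
  | cons c rest ih =>
    by_cases hc : p c
    · simp [hc, ih]
    · simp [hc]

theorem pv_lstrip_rstrip_comm (x : List Char) :
    PySem.Chars.lstrip (PySem.Chars.rstrip x) = PySem.Chars.rstrip (PySem.Chars.lstrip x) := by
  unfold PySem.Chars.lstrip PySem.Chars.rstrip
  rcases hx : List.dropWhile PySem.Chars.isspace x with _ | ⟨c, y⟩
  · have : ∀ a ∈ x, PySem.Chars.isspace a := by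
      intro a ha
      by_contra hns
      have := List.dropWhile_eq_nil_iff.mp hx a ha
      exact hns this
    have hrev : List.dropWhile PySem.Chars.isspace x.reverse = [] := by
      rw [List.dropWhile_eq_nil_iff]
      intro a ha; exact this a (List.mem_reverse.mp ha)
    simp [hrev]
  · have hc : ¬ PySem.Chars.isspace c := by
      have := List.head_dropWhile_not (p := PySem.Chars.isspace) (l := x) (by simp [hx])
      simpa [hx] using this
    have hsplit : x = x.takeWhile PySem.Chars.isspace ++ (c :: y) := by
      rw [← hx, List.takeWhile_append_dropWhile]
    have hall : ∀ a ∈ x.takeWhile PySem.Chars.isspace, PySem.Chars.isspace a :=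
      fun a ha => List.mem_takeWhile_imp ha
    -- rstrip x = takeWhile ++ rstrip (c :: y)
    have hr : (List.dropWhile PySem.Chars.isspace x.reverse).reverse =
        x.takeWhile PySem.Chars.isspace ++ (List.dropWhile PySem.Chars.isspace (c :: y).reverse).reverse := by
      conv_lhs => rw [hsplit]
      rw [List.reverse_append, List.dropWhile_append]
      by_cases hy : (List.dropWhile PySem.Chars.isspace (c :: y).reverse).isEmpty
      · exfalso
        rw [List.isEmpty_iff, List.dropWhile_eq_nil_iff] at hy
        exact hc (hy c (by simp))
      · rw [if_neg hy]
        simp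
    rw [hr, List.dropWhile_append]
    by_cases hy : (List.dropWhile PySem.Chars.isspace (x.takeWhile PySem.Chars.isspace)).isEmpty
    · rw [if_pos hy]
      rcases hz : (List.dropWhile PySem.Chars.isspace (c :: y).reverse).reverse with _ | ⟨d, z⟩
      · simp
      · have hd : c = d := by
          have hpre : (List.dropWhile PySem.Chars.isspace (c :: y).reverse).reverse <+: (c :: y) := by
            have h := List.dropWhile_suffix (l := (c :: y).reverse) PySem.Chars.isspace
            simpa using List.IsSuffix.reverse h
          rw [hz] at hpre
          rcases hpre with ⟨t, ht⟩
          simpa using congrArg (List.head? ·) ht.symm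
        subst hd
        simp [hc]
    · exfalso
      rw [List.isEmpty_iff, List.dropWhile_eq_nil_iff] at hy
      push Not at hy
      rcases hy with ⟨a, ha, hns⟩
      exact hns (hall a ha)

theorem pv_rstrip_idem (x : List Char) : PySem.Chars.rstrip (PySem.Chars.rstrip x) = PySem.Chars.rstrip x := by
  unfold PySem.Chars.rstrip
  rw [List.reverse_reverse, pv_dropWhile_idem]

theorem pv_strip_rstrip (x : List Char) : PySem.Chars.strip (PySem.Chars.rstrip x) = PySem.Chars.strip x := by
  unfold PySem.Chars.strip
  rw [pv_lstrip_rstrip_comm, pv_rstrip_idem]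

-- prefix can't reach past a char it doesn't contain
theorem pv_prefix_append_cons (p : List Char) (c : Char) (hc : c ∉ p) :
    ∀ (l r : List Char), (p <+: l ++ c :: r) ↔ p <+: l := by
  induction p with
  | nil => intro l r; simp
  | cons x p' ih =>
    intro l r
    constructor
    · intro h
      cases l with
      | nil =>
        rcases h with ⟨t, ht⟩
        simp at ht
        exact absurd ht.1.symm (by intro hxc; exact hc (by simp [hxc]))
      | cons y l' =>
        rcases h with ⟨t, ht⟩
        simp at ht
        rcases ht with ⟨hxy, hrest⟩
        have : p' <+: l' ++ c :: r := ⟨t, hrest⟩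
        have := (ih (fun hm => hc (List.mem_cons_of_mem _ hm)) l' r).mp this
        rcases this with ⟨t', ht'⟩
        exact ⟨t', by simp [hxy, ht']⟩
    · intro h
      exact h.trans ⟨c :: r, rfl⟩

theorem pv_takeWhile_all_append (p : Char → Bool) (s t : List Char) :
    (∀ c ∈ s, p c) → List.takeWhile p (s ++ t) = s ++ List.takeWhile p t := by
  induction s with
  | nil => intro _; rfl
  | cons c s' ih =>
    intro h
    have hc := h c (by simp)
    simp only [List.cons_append, List.takeWhile_cons, hc, if_pos]
    rw [ih (fun a ha => h a (List.mem_cons_of_mem _ ha))]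

-- pvTryBody on a segment followed by nothing or by ';'-separated rest
theorem pv_tryBody_eq (seg tail : List Char) (hns : ';' ∉ seg)
    (htail : tail = [] ∨ ∃ r, tail = ';' :: r) :
    pvTryBody (seg ++ tail) =
      if "text-align:".toList.isPrefixOf (seg.dropWhile PySem.Chars.isspace) then
        some ((seg.dropWhile PySem.Chars.isspace).drop 11)
      else none := by
  unfold pvTryBody
  simp only [List.isPrefixOf_iff_prefix]
  rw [List.dropWhile_append]
  by_cases hl : (List.dropWhile PySem.Chars.isspace seg).isEmpty
  · rw [if_pos hl]
    rw [List.isEmpty_iff] at hl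
    have htl : List.dropWhile PySem.Chars.isspace tail = tail := by
      rcases htail with h | ⟨r, h⟩ <;> subst h
      · rfl
      · rw [List.dropWhile_cons_of_neg (by decide)]
    have hnp : ¬ ("text-align:".toList <+: tail) := by
      rcases htail with h | ⟨r, h⟩ <;> subst h
      · decide
      · intro hpre
        rw [← List.isPrefixOf_iff_prefix] at hpre
        simp [List.isPrefixOf] at hpre
    rw [htl, hl, if_neg hnp, if_neg (by decide)]
  · rw [if_neg hl]
    have hsemi_l : ';' ∉ List.dropWhile PySem.Chars.isspace seg := by
      intro hm
      exact hns ((List.dropWhile_suffix _).subset hm)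
    have hiff : ("text-align:".toList <+: (List.dropWhile PySem.Chars.isspace seg) ++ tail) ↔
        ("text-align:".toList <+: List.dropWhile PySem.Chars.isspace seg) := by
      rcases htail with h | ⟨r, h⟩ <;> subst h
      · simp
      · exact pv_prefix_append_cons _ ';' (by decide) _ _
    by_cases hp : "text-align:".toList <+: List.dropWhile PySem.Chars.isspace seg
    · rw [if_pos (hiff.mpr hp), if_pos hp]
      rcases hp with ⟨s', hs'⟩
      rw [← hs']
      have h11 : ("text-align:".toList ++ s') ++ tail = "text-align:".toList ++ (s' ++ tail) := by simp
      rw [h11, List.drop_append_of_le_length (by decide), List.drop_append_of_le_length (by decide)]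
      rw [show List.drop 11 "text-align:".toList = [] from rfl]
      simp only [List.nil_append]
      have hs'' : ';' ∉ s' := by
        intro hm
        exact hsemi_l (by rw [← hs']; exact List.mem_append_right _ hm)
      rw [pv_takeWhile_all_append _ s' tail (by
        intro c hc
        simp only [bne_iff_ne, ne_eq]
        exact fun h => hs'' (h ▸ hc))]
      have htw : List.takeWhile (fun c => c != ';') tail = [] := by
        rcases htail with h | ⟨r, h⟩ <;> subst h <;> simp
      rw [htw]
      simp
    · rw [if_neg (fun h => hp (hiff.mp h)), if_neg hp]

theorem pv_scan_skip (seg : List Char) (hns : ';' ∉ seg) (tail : List Char) :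
    pvScan (seg ++ tail) = pvScan tail := by
  induction seg with
  | nil => rfl
  | cons c s' ih =>
    have hc : c ≠ ';' := fun h => hns (by simp [h])
    simp only [List.cons_append, pvScan, beq_iff_eq, if_neg hc]
    exact ih (fun h => hns (List.mem_cons_of_mem _ h))

-- pvSearch over ';'-joined segments is pvRawFind
theorem pv_search_intercal : ∀ (segs : List (List Char)), segs ≠ [] →
    (∀ seg ∈ segs, ';' ∉ seg) →
    pvSearch (pvIntercal segs) = pvRawFind segs := by
  intro segs
  induction segs with
  | nil => intro h; exact absurd rfl h
  | cons seg t ih =>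
    intro _ hall
    cases t with
    | nil =>
      show pvSearch seg = pvRawFind [seg]
      have ht := pv_tryBody_eq seg [] (hall seg (by simp)) (Or.inl rfl)
      rw [List.append_nil] at ht
      have hsc : pvScan seg = none := by
        have h := pv_scan_skip seg (hall seg (by simp)) []
        rw [List.append_nil] at h
        rw [h]
        rfl
      unfold pvSearch pvRawFind
      rw [ht]
      by_cases hp : "text-align:".toList.isPrefixOf (seg.dropWhile PySem.Chars.isspace)
      · rw [if_pos hp, if_pos hp]
      · rw [if_neg hp, if_neg hp]
        simpa [pvRawFind] using hsc
    | cons s2 t2 =>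
      show pvSearch (seg ++ ';' :: pvIntercal (s2 :: t2)) = pvRawFind (seg :: s2 :: t2)
      have ht := pv_tryBody_eq seg (';' :: pvIntercal (s2 :: t2)) (hall seg (by simp))
        (Or.inr ⟨_, rfl⟩)
      have hscan : pvScan (seg ++ ';' :: pvIntercal (s2 :: t2)) =
          pvSearch (pvIntercal (s2 :: t2)) := by
        rw [pv_scan_skip seg (hall seg (by simp))]
        simp [pvScan, pvSearch]
      unfold pvSearch pvRawFind
      rw [ht, hscan]
      by_cases hp : "text-align:".toList.isPrefixOf (seg.dropWhile PySem.Chars.isspace)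
      · rw [if_pos hp, if_pos hp]
      · rw [if_neg hp, if_neg hp]
        exact ih (by simp) (fun x hx => hall x (List.mem_cons_of_mem _ hx))

-- A's inner loop over the split parts is pvRawFind followed by strip
theorem pv_inner_eq_rawFind : ∀ (segs : List (List Char)),
    pvParseAlignInner (segs.map String.ofList) =
      (pvRawFind segs).map (fun v => String.ofList (PySem.Chars.strip v)) := by
  intro segs
  induction segs with
  | nil => rfl
  | cons seg t ih =>
    show pvParseAlignInner (String.ofList seg :: t.map String.ofList) = _
    unfold pvParseAlignInner pvRawFind
    simp only [PySem.Str.strip, PySem.Str.startswith, PySem.Chars.startswith,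
      String.toList_ofList]
    by_cases hp : "text-align:".toList <+: (seg.dropWhile PySem.Chars.isspace)
    · have hpS : "text-align:".toList <+: PySem.Chars.strip seg := (pv_prefix_strip_iff seg).mpr hp
      rw [if_pos (by simpa [List.isPrefixOf_iff_prefix] using hpS),
        if_pos (by simpa [List.isPrefixOf_iff_prefix] using hp)]
      -- strip seg = "text-align" ++ ':' :: rstrip s'  where lstrip seg = pref ++ s'
      rcases hp with ⟨s', hs'⟩
      have hstrip : PySem.Chars.strip seg = "text-align:".toList ++ PySem.Chars.rstrip s' := by
        unfold PySem.Chars.strip PySem.Chars.lstrip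
        rw [show seg.dropWhile PySem.Chars.isspace = "text-align:".toList ++ s' from hs'.symm]
        exact pv_rstrip_append _ _ pv_pref_rstrip
      simp only [PySem.Str.splitMax?, String.toList_ofList, PySem.Chars.splitMax?]
      rw [if_neg (by decide)]
      rw [show (":".toList) = [':'] from rfl]
      have hshape : PySem.Chars.strip seg = "text-align".toList ++ ':' :: PySem.Chars.rstrip s' := by
        rw [hstrip]; rfl
      rw [hshape, pv_splitOnMax_colon _ _ (by decide)]
      simp only [Option.map_some, List.map_cons, List.map_nil]
      rw [show PySem.List.pyGet? [String.ofList "text-align".toList, String.ofList (PySem.Chars.rstrip s')] (1 : Int) = some (String.ofList (PySem.Chars.rstrip s')) from rfl]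
      simp only [Option.some.injEq]

      rw [String.toList_ofList, pv_strip_rstrip]
      congr 1
      rw [← hs', List.drop_append_of_le_length (by decide)]
      rw [show List.drop 11 "text-align:".toList = [] from by decide]
      rw [List.nil_append]
    · rw [if_neg (by simpa [List.isPrefixOf_iff_prefix] using
          (fun h => hp ((pv_prefix_strip_iff seg).mp h))),
        if_neg (by simpa [List.isPrefixOf_iff_prefix] using hp)]
      exact ih

-- if the scan finds something, "text-align" occurs in the string (A's gate)
theorem pv_rawFind_gate (segs : List (List Char)) (cs : List Char)
    (hj : pvIntercal segs = cs) :
    ∀ v, pvRawFind segs = some v → PySem.Chars.isIn "text-align".toList cs = true := by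
  induction segs generalizing cs with
  | nil => intro v h; exact absurd h (by simp [pvRawFind])
  | cons seg t ih =>
    intro v h
    unfold pvRawFind at h
    rw [PySem.Chars.isIn_iff_infix]
    by_cases hp : "text-align:".toList.isPrefixOf (seg.dropWhile PySem.Chars.isspace)
    · rw [List.isPrefixOf_iff_prefix] at hp
      have h1 : "text-align".toList <+: (seg.dropWhile PySem.Chars.isspace) :=
        List.IsPrefix.trans (by decide) hp
      have h2 : (seg.dropWhile PySem.Chars.isspace) <:+ seg := List.dropWhile_suffix _
      have h3 : seg <+: cs := by
        rw [← hj]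
        cases t with
        | nil => exact ⟨[], by simp [pvIntercal]⟩
        | cons s2 t2 => exact ⟨';' :: pvIntercal (s2 :: t2), rfl⟩
      exact ((h1.isInfix.trans h2.isInfix).trans h3.isInfix)
    · rw [if_neg hp] at h
      cases t with
      | nil => exact absurd h (by simp [pvRawFind])
      | cons s2 t2 =>
        have := ih (cs := pvIntercal (s2 :: t2)) rfl v h
        rw [PySem.Chars.isIn_iff_infix] at this
        have hsuf : pvIntercal (s2 :: t2) <:+ cs := by
          rw [← hj]
          refine ⟨seg ++ [';'], ?_⟩
          show (seg ++ [';']) ++ pvIntercal (s2 :: t2) = pvIntercal (seg :: s2 :: t2)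
          simp [pvIntercal]
        exact this.trans hsuf.isInfix

-- per-string: A's gated split-scan equals B's search
theorem pv_string_eq (s : String) :
    (if PySem.Str.isIn "text-align" s then
      match PySem.Str.split? s ";" with
      | some parts => pvParseAlignInner parts
      | none => none
     else none) =
    (pvSearch s.toList).map (fun cap => String.ofList (PySem.Chars.strip cap)) := by
  have hsplit : PySem.Str.split? s ";" = some ((pvMySplit s.toList).map String.ofList) := by
    rw [PySem.Str.split?, PySem.Chars.split?]
    rw [if_neg (by decide)]
    rw [show (";".toList) = [';'] from rfl, pv_splitOn_semi]
    rfl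
  have hsearch : pvSearch s.toList = pvRawFind (pvMySplit s.toList) := by
    rw [← pvIntercal_mySplit s.toList]
    rw [pv_search_intercal _ (pvMySplit_ne_nil _) (pvMySplit_no_semi _)]
    rw [pvIntercal_mySplit]
  by_cases hin : PySem.Str.isIn "text-align" s
  · rw [if_pos hin, hsplit]
    show pvParseAlignInner ((pvMySplit s.toList).map String.ofList) = _
    rw [pv_inner_eq_rawFind, hsearch]
  · rw [if_neg hin]
    rcases hr : pvRawFind (pvMySplit s.toList) with _ | v
    · rw [hsearch, hr]; rfl
    · exfalso
      have := pv_rawFind_gate (pvMySplit s.toList) s.toList (pvIntercal_mySplit _) v hr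
      rw [PySem.Str.isIn] at hin
      rw [show ("text-align".toList) = String.toList "text-align" from rfl] at this
      exact hin this

-- ===== VERDICT (by name: the statement is the Claim_ definition above) =====
theorem parse_align_py_spec : Claim_equal_parse_align_py := by
  unfold Claim_equal_parse_align_py
  intro attrs hdom
  unfold Spec_parse_align_py
  clear hdom
  induction attrs with
  | nil => rfl
  | cons kv rest ih =>
    rcases kv with ⟨k, v⟩
    cases v with
    | none =>
      simp only [parse_align_py, parse_align_py_alt]
      exact ih
    | some s =>
      simp only [parse_align_py, parse_align_py_alt]
      by_cases hks : (k == "style" && !(s == "")) = true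
      · rw [hks, Bool.true_and]
        rw [pv_string_eq s]
        cases hsr : (pvSearch s.toList).map (fun cap => String.ofList (PySem.Chars.strip cap)) with
        | none => exact ih
        | some r => rfl
      · rw [Bool.eq_false_iff.mpr hks]
        simp only [Bool.false_and]
        exact ih
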